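-- pv_equiv track=rewrite | github.com/tbocina/rosalind-solutions | BA2B.py | mutations
-- ===== SOURCE A (Python) =====
-- def mutations(pattern,errorind):
--     #generate all mutations for a pattern at indices given in errorind
--     #such that Hamming distance is equal to the sum(errorind)
--     def f(base, start=""):
--         if base=="A":
--             return [start + "C", start + "G", start + "T"]
--         if base=="C":
--             return [start + "A", start + "G", start + "T"]
--         if base=="G":
--             return [start + "A", start + "C", start + "T"]
--         if base=="T":
--             return [start + "A", start + "C", start + "G"]
--     L=[""]
--     for base, error in zip(pattern, errorind):
--         if error==0:
--             L=[x+base for x in L]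
--         else:
--             tmp=[f(base,x) for x in L]
--             L=[]
--             [[L.append(x) for x in x1] for x1 in tmp]
--     return L
-- ===== SOURCE B (Python) =====
-- def mutations(pattern, errorind):
--     # Mixed-radix enumeration: compute per-position option strings once, then
--     # decode every index k in range(total) directly into its mutated string.
--     others = {'A': 'CGT', 'C': 'AGT', 'G': 'ACT', 'T': 'ACG'}
--     opts = [base if e == 0 else others[base]
--             for base, e in zip(pattern, errorind)]
--     total = 1
--     for o in opts:
--         total *= len(o)
--     res = []
--     for k in range(total):
--         chars = []
--         rem = k
--         t = total
--         for o in opts: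
--             t //= len(o)
--             d, rem = divmod(rem, t)
--             chars.append(o[d])
--         res.append("".join(chars))
--     return res
-- ===== Notes on version B (the rewrite author's own statement) =====
-- stated objective: alternative
-- what changed: B enumerates results by mixed-radix counting: it precomputes the per-position alphabets, multiplies their sizes into total, and decodes each index k in range(total) with divmod into one output string, instead of A's repeated list cross-extension.
import Mathlib
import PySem

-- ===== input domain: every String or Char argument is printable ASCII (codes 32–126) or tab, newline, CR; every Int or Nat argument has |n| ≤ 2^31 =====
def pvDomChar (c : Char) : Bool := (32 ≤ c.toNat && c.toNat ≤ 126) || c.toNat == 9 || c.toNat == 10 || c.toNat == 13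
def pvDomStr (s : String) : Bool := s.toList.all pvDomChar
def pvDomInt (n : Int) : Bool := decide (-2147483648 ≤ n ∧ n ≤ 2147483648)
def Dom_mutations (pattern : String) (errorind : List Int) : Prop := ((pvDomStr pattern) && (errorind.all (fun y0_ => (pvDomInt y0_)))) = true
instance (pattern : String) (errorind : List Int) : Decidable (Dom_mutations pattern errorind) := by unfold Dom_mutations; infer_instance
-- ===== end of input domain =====

-- B replaces A's iterative prefix-extension with mixed-radix enumeration: it counts
-- k = 0..total-1 and decodes each k by divmod into one mutated string (objective: alternative).


-- ===== PORT A =====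
-- Strings are ported as their character lists (PySem.Chars convention) and turned into
-- String with String.ofList at the very end; 'x + base' is 'x ++ [base]'.
-- A's helper f; on a base outside "ACGT" the Python returns None and the caller's
-- comprehension raises TypeError — those inputs are excluded by Pre_mutations,
-- the port returns [] there (nothing is claimed outside Pre_).
def mutF (base : Char) (start : List Char) : List (List Char) :=
  if base = 'A' then [start ++ ['C'], start ++ ['G'], start ++ ['T']]
  else if base = 'C' then [start ++ ['A'], start ++ ['G'], start ++ ['T']]
  else if base = 'G' then [start ++ ['A'], start ++ ['C'], start ++ ['T']]
  else if base = 'T' then [start ++ ['A'], start ++ ['C'], start ++ ['G']]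
  else []

-- the 'for base, error in zip(pattern, errorind)' loop, carrying L
def mutLoop : List (Char × Int) → List (List Char) → List (List Char)
  | [], L => L
  | (base, error) :: rest, L =>
    if error = 0 then
      mutLoop rest (L.map (fun x => x ++ [base]))
    else
      mutLoop rest ((L.map (fun x => mutF base x)).flatten)

def mutations (pattern : String) (errorind : List Int) : List String :=
  (mutLoop (pattern.toList.zip errorind) [[]]).map String.ofList

-- ===== PORT B =====
-- B's others[base]; a missing key raises KeyError in Python (outside Pre_), [] here.
def mutOthers (base : Char) : List Char :=
  if base = 'A' then ['C', 'G', 'T']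
  else if base = 'C' then ['A', 'G', 'T']
  else if base = 'G' then ['A', 'C', 'T']
  else if base = 'T' then ['A', 'C', 'G']
  else []

-- opts = [base if e == 0 else others[base] for base, e in zip(pattern, errorind)]
def mutOpts (pattern : String) (errorind : List Int) : List (List Char) :=
  (pattern.toList.zip errorind).map (fun p => if p.2 = 0 then [p.1] else mutOthers p.1)

-- total = 1; for o in opts: total *= len(o)
def mutTotal (opts : List (List Char)) : Int :=
  opts.foldl (fun t o => t * (o.length : Int)) 1

-- the inner 'for o in opts' loop of B, state = (chars, rem, t);
-- divmod(rem, t) is (floordiv, mod) (t > 0 whenever Python reaches this line under Pre_);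
-- o[d] is pyGetD with an arbitrary default — d is in range whenever k < total.
def mutDecodeStep (st : List Char × Int × Int) (o : List Char) : List Char × Int × Int :=
  let t := PySem.Int.floordiv st.2.2 (o.length : Int)
  (st.1 ++ [PySem.List.pyGetD o (PySem.Int.floordiv st.2.1 t) 'A'],
   PySem.Int.mod st.2.1 t, t)

def mutations_alt (pattern : String) (errorind : List Int) : List String :=
  (PySem.List.pyRange 0 (mutTotal (mutOpts pattern errorind)) 1).map (fun k =>
    String.ofList ((mutOpts pattern errorind).foldl mutDecodeStep
      ([], k, mutTotal (mutOpts pattern errorind))).1)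

-- ===== PRECONDITION & SPEC =====
-- Pre_ excludes exactly the inputs on which Python A raises (TypeError: at some zipped
-- position error != 0 and the base is not one of A,C,G,T); B raises KeyError there too.
def Pre_mutations (pattern : String) (errorind : List Int) : Prop :=
  ∀ p ∈ pattern.toList.zip errorind,
    p.2 ≠ 0 → (p.1 = 'A' ∨ p.1 = 'C' ∨ p.1 = 'G' ∨ p.1 = 'T')
instance (pattern : String) (errorind : List Int) : Decidable (Pre_mutations pattern errorind) := by
  unfold Pre_mutations; infer_instance

def pvWitness_mutations : String × List Int := ("AC", [0, 1])

def Spec_mutations (pattern : String) (errorind : List Int) (out : List String) : Prop := out = mutations_alt pattern errorind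
instance (pattern : String) (errorind : List Int) (out : List String) : Decidable (Spec_mutations pattern errorind out) := by unfold Spec_mutations; infer_instance

-- ===== CLAIM =====
def Claim_equal_mutations : Prop := ∀ (pattern : String) (errorind : List Int), Dom_mutations pattern errorind → Pre_mutations pattern errorind → Spec_mutations pattern errorind (mutations pattern errorind)

-- ===== LEMMAS AND PROOFS =====
-- the common abstract description: cross product of the per-position alphabets
def cross : List (List Char) → List (List Char)
  | [] => [[]]
  | o :: os => o.flatMap (fun c => (cross os).map (fun s => c :: s))

def prodL (opts : List (List Char)) : Nat := (opts.map List.length).prod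

def dec : List (List Char) → Nat → List Char
  | [], _ => []
  | o :: os, k => o.getD (k / prodL os) 'A' :: dec os (k % prodL os)

theorem mutF_eq (base : Char) (x : List Char) :
    mutF base x = (mutOthers base).map (fun c => x ++ [c]) := by
  by_cases hA : base = 'A'; · simp [mutF, mutOthers, hA]
  by_cases hC : base = 'C'; · simp [mutF, mutOthers, hC]
  by_cases hG : base = 'G'; · simp [mutF, mutOthers, hG]
  by_cases hT : base = 'T'; · simp [mutF, mutOthers, hT]
  simp [mutF, mutOthers, hA, hC, hG, hT]

-- A's loop = cross product of the alphabets, appended behind every prefix in L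
theorem mutLoop_eq_cross (zs : List (Char × Int)) (L : List (List Char)) :
    mutLoop zs L =
      L.flatMap (fun x =>
        (cross (zs.map (fun p => if p.2 = 0 then [p.1] else mutOthers p.1))).map
          (fun s => x ++ s)) := by
  induction zs generalizing L with
  | nil => simp [mutLoop, cross]
  | cons hd tl ih =>
    obtain ⟨base, e⟩ := hd
    by_cases he : e = 0
    · simp only [mutLoop, he, if_pos, ih, List.map_cons, cross]
      simp [List.flatMap_def, List.map_map, Function.comp_def, List.append_assoc]
    · simp only [mutLoop, he, ih, List.map_cons, cross, if_false]
      simp only [mutF_eq]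
      simp [List.flatMap_def, List.map_map, Function.comp_def, List.flatten_flatten,
        List.append_assoc]

theorem cross_of_nil_mem (opts : List (List Char)) (h : [] ∈ opts) : cross opts = [] := by
  induction opts with
  | nil => cases h
  | cons o os ih =>
    rcases List.mem_cons.mp h with h | h
    · simp [cross, ← h]
    · simp [cross, ih h]

theorem prodL_pos (opts : List (List Char)) (h : ∀ o ∈ opts, o ≠ []) : 0 < prodL opts := by
  induction opts with
  | nil => simp [prodL]
  | cons o os ih =>
    have h1 : 0 < o.length := List.length_pos_iff.mpr (h o (by simp))
    have h2 := ih (fun l hl => h l (List.mem_cons_of_mem _ hl))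
    simpa [prodL] using Nat.mul_pos h1 h2

theorem prodL_zero_of_nil_mem (opts : List (List Char)) (h : [] ∈ opts) : prodL opts = 0 := by
  apply List.prod_eq_zero
  exact List.mem_map.mpr ⟨[], h, rfl⟩

theorem mutTotal_eq (opts : List (List Char)) : mutTotal opts = ((prodL opts : Nat) : Int) := by
  have key : ∀ (os : List (List Char)) (a : Int),
      os.foldl (fun t o => t * (o.length : Int)) a = a * ((prodL os : Nat) : Int) := by
    intro os
    induction os with
    | nil => intro a; simp [prodL]
    | cons o os ih =>
      intro a
      simp only [List.foldl_cons, ih, prodL, List.map_cons, List.prod_cons]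
      push_cast; ring
  simpa using key opts 1

theorem map_getD_range (o : List Char) :
    (List.range o.length).map (fun i => o.getD i 'A') = o := by
  apply List.ext_getElem
  · simp
  · intro i h1 h2
    simp [List.getD_eq_getElem?_getD, List.getElem?_eq_getElem h2]

theorem range_mul_flatMap (n T : Nat) :
    List.range (n * T) = (List.range n).flatMap (fun d => (List.range T).map (fun r => d * T + r)) := by
  induction n with
  | zero => simp
  | succ n ih =>
    rw [Nat.succ_mul, List.range_add, ih, List.range_succ]
    simp

theorem dec_range_eq_cross (opts : List (List Char)) (h : ∀ o ∈ opts, o ≠ []) :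
    (List.range (prodL opts)).map (dec opts) = cross opts := by
  induction opts with
  | nil => simp [prodL, dec, cross]
  | cons o os ih =>
    have hT : 0 < prodL os := prodL_pos os (fun l hl => h l (List.mem_cons_of_mem _ hl))
    have hcross := ih (fun l hl => h l (List.mem_cons_of_mem _ hl))
    have hP : prodL (o :: os) = o.length * prodL os := by simp [prodL]
    rw [hP, range_mul_flatMap, List.map_flatMap]
    have step : ∀ d ∈ List.range o.length,
        ((List.range (prodL os)).map (fun r => d * (prodL os) + r)).map (dec (o :: os)) =
          (cross os).map (fun s => o.getD d 'A' :: s) := by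
      intro d _
      rw [← hcross, List.map_map, List.map_map]
      apply List.map_congr_left
      intro r hr
      have hrT : r < prodL os := List.mem_range.mp hr
      have h1 : (d * prodL os + r) / prodL os = d := by
        rw [Nat.mul_comm d, Nat.mul_add_div hT, Nat.div_eq_of_lt hrT]
        omega
      have h2 : (d * prodL os + r) % prodL os = r := by
        rw [Nat.mul_comm d, Nat.mul_add_mod, Nat.mod_eq_of_lt hrT]
      simp [dec, h1, h2]
    rw [List.flatMap_congr step]
    show _ = cross (o :: os)
    conv_rhs => rw [cross, ← map_getD_range o]
    rw [List.flatMap_map]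

-- B's inner fold computes dec
theorem fold_decode (opts : List (List Char)) (chars : List Char) (k : Nat)
    (h : ∀ o ∈ opts, o ≠ []) (hk : k < prodL opts) :
    (opts.foldl mutDecodeStep (chars, (k : Int), ((prodL opts : Nat) : Int))).1 =
      chars ++ dec opts k := by
  induction opts generalizing chars k with
  | nil => simp [dec]
  | cons o os ih =>
    have hlo : 0 < o.length := List.length_pos_iff.mpr (h o (by simp))
    have hT : 0 < prodL os := prodL_pos os (fun l hl => h l (List.mem_cons_of_mem _ hl))
    have hP : prodL (o :: os) = o.length * prodL os := by simp [prodL]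
    have hkP : k % prodL os < prodL os := Nat.mod_lt _ hT
    have step1 : mutDecodeStep (chars, (k : Int), ((prodL (o :: os) : Nat) : Int)) o =
        (chars ++ [o.getD (k / prodL os) 'A'], ((k % prodL os : Nat) : Int),
          ((prodL os : Nat) : Int)) := by
      simp only [mutDecodeStep, hP]
      rw [PySem.Int.floordiv_natCast, Nat.mul_div_cancel_left _ hlo,
        PySem.Int.floordiv_natCast, PySem.Int.mod_natCast, PySem.List.pyGetD_natCast]
    rw [List.foldl_cons, step1, ih _ _ (fun l hl => h l (List.mem_cons_of_mem _ hl)) hkP]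
    simp [dec]

-- ===== VERDICT =====
theorem mutations_spec : Claim_equal_mutations := by
  intro pattern errorind _ hpre
  unfold Spec_mutations mutations mutations_alt
  set opts := mutOpts pattern errorind with hopts
  have hA : mutLoop (pattern.toList.zip errorind) [[]] = cross opts := by
    rw [mutLoop_eq_cross]
    simp [hopts, mutOpts]
  rw [hA, mutTotal_eq]
  by_cases hnil : ∀ o ∈ opts, o ≠ []
  · rw [PySem.List.pyRange_zero_natCast, List.map_map]
    rw [← dec_range_eq_cross opts hnil, List.map_map]
    apply List.map_congr_left
    intro k hk
    have hkp : k < prodL opts := List.mem_range.mp hk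
    simp only [Function.comp_def]
    rw [fold_decode opts [] k hnil hkp]
    simp
  · push Not at hnil
    obtain ⟨o, ho, ho0⟩ := hnil
    rw [cross_of_nil_mem opts (ho0 ▸ ho), prodL_zero_of_nil_mem opts (ho0 ▸ ho)]
    simp
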